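-- pv_equiv track=rewrite | github.com/Penil93/Code_study | programmers/level2/Check_phone_number.py | make_phone_book_hash
-- ===== SOURCE A (Python) =====
-- def make_phone_book_hash(phone_book):
--     phone_book_hash = dict()
--     for phone_number in phone_book:
--         for index in range(1,len(phone_number)+1):
--             if phone_number[:index] not in phone_book_hash.keys():
--                 phone_book_hash[phone_number[:index]] = 1
--             else:
--                 phone_book_hash[phone_number[:index]] += 1
--     return phone_book_hash
-- ===== SOURCE B (Python) =====
-- def make_phone_book_hash(phone_book):
--     # Flat-array prefix trie: nodes are indices; descend char by char, creating
--     # nodes as needed and counting visits; node creation order = first-occurrence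
--     # order of prefixes, so emitting nodes 1..N-1 reproduces the dict order.
--     children = [{}]   # children[i]: char -> child node index
--     counts = [0]      # counts[i]: how often node i's prefix occurred
--     prefixes = [""]   # prefixes[i]: the prefix string of node i
--     for number in phone_book:
--         node = 0
--         for ch in number:
--             nxt = children[node].get(ch)
--             if nxt is None:
--                 nxt = len(children)
--                 children[node][ch] = nxt
--                 children.append({})
--                 counts.append(0)
--                 prefixes.append(prefixes[node] + ch)
--             counts[nxt] += 1
--             node = nxt
--     return {prefixes[i]: counts[i] for i in range(1, len(counts))}
-- ===== Notes on version B (the rewrite author's own statement) =====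
-- stated objective: alternative
-- what changed: Replaced A's repeated string slicing into one flat membership-tested dict by a flat-array prefix trie: one character-by-character descent per number with per-node visit counts, the result emitted from the node arrays in creation order.
import Mathlib
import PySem

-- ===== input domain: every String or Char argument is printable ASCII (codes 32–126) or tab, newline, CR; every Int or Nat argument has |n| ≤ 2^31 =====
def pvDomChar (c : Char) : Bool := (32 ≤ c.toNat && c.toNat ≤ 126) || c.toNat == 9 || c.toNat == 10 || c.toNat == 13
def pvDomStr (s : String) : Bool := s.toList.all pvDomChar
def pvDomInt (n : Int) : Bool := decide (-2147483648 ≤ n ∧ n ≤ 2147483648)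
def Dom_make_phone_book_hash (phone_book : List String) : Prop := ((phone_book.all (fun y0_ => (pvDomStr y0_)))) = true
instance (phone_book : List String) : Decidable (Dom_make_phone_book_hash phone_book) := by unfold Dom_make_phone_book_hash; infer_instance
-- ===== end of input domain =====

-- B replaces A's per-prefix string slicing into a flat membership-tested dict by a
-- flat-array prefix trie (character descent with per-node counts); same return value.

-- ===== PORT A =====
def make_phone_book_hash (phone_book : List String) : List (String × Int) :=
  (phone_book.foldl
    (fun phone_book_hash phone_number =>
      (PySem.List.pyRange 1 (PySem.Str.len phone_number + 1) 1).foldl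
        (fun phone_book_hash index =>
          if PySem.Str.slice phone_number none (some index) ∉ phone_book_hash.keys then
            phone_book_hash.insert (PySem.Str.slice phone_number none (some index)) 1
          else
            phone_book_hash.modify (PySem.Str.slice phone_number none (some index)) 0 (· + 1))
        phone_book_hash)
    PySem.Dict.empty).items

-- ===== PORT B =====
-- trie state: children maps (char -> child node index), visit counts, prefix strings
structure PvTrie where
  children : List (PySem.Dict Char Nat)
  counts   : List Int
  prefixes : List String

-- one character of the descent (the body of B's inner loop); node indices are the
-- Nat positions B's Python keeps in its flat lists (always in range, so getD/set
-- are exact for Python's list indexing here)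
def pvTrieStep (st : PvTrie × Nat) (ch : Char) : PvTrie × Nat :=
  let t := st.1
  let node := st.2
  match (t.children.getD node PySem.Dict.empty).get? ch with
  | some nxt =>
      (⟨t.children, t.counts.set nxt (t.counts.getD nxt 0 + 1), t.prefixes⟩, nxt)
  | none =>
      let nxt := t.children.length
      (⟨t.children.set node ((t.children.getD node PySem.Dict.empty).insert ch nxt) ++ [PySem.Dict.empty],
        (t.counts ++ [0]).set nxt ((t.counts ++ [0]).getD nxt 0 + 1),
        t.prefixes ++ [t.prefixes.getD node "" ++ ch.toString]⟩, nxt)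

def make_phone_book_hash_alt (phone_book : List String) : List (String × Int) :=
  let t := phone_book.foldl
    (fun t number => (number.toList.foldl pvTrieStep (t, 0)).1)
    ⟨[PySem.Dict.empty], [0], [""]⟩
  ((PySem.List.pyRange 1 (PySem.List.len t.counts) 1).foldl
    (fun d i => d.insert (PySem.List.pyGetD t.prefixes i "") (PySem.List.pyGetD t.counts i 0))
    PySem.Dict.empty).items

-- ===== PRECONDITION & SPEC =====
def Spec_make_phone_book_hash (phone_book : List String) (out : List (String × Int)) : Prop := out = make_phone_book_hash_alt phone_book
instance (phone_book : List String) (out : List (String × Int)) : Decidable (Spec_make_phone_book_hash phone_book out) := by unfold Spec_make_phone_book_hash; infer_instance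

-- ===== CLAIM (what is proved, stated in full; the proofs are below) =====
def Claim_equal_make_phone_book_hash : Prop := ∀ (phone_book : List String), Dom_make_phone_book_hash phone_book → Spec_make_phone_book_hash phone_book (make_phone_book_hash phone_book)

-- ===== LEMMAS AND PROOFS =====

-- string helpers (String is opaque: work through toList)
lemma pvAppend_ne_empty (s : String) (c : Char) : s ++ c.toString ≠ "" := by
  intro h
  have := congrArg String.toList h
  simp at this

lemma pvAppend_inj {s₁ s₂ : String} {c₁ c₂ : Char}
    (h : s₁ ++ c₁.toString = s₂ ++ c₂.toString) : s₁ = s₂ ∧ c₁ = c₂ := by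
  have := congrArg String.toList h
  simp at this
  exact ⟨String.ext this.1, this.2⟩

lemma pvOfList_cons (c : Char) (l : List Char) :
    String.ofList (c :: l) = c.toString ++ String.ofList l := by
  apply String.ext; simp

lemma pvSlice_key (s : String) (k : Nat) :
    PySem.Str.slice s none (some (1 + (k:Int))) = String.ofList (s.toList.take (k+1)) := by
  apply String.ext
  simp [pysem]
  rw [PySem.List.slice_to s.toList (by omega)]
  congr 1
  omega

-- A's dict-update step, with the key already computed
def pvAStep (d : PySem.Dict String Int) (key : String) : PySem.Dict String Int :=
  if key ∉ d.keys then d.insert key 1 else d.modify key 0 (· + 1)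

-- the simulation invariant between A's dict and B's trie state
def pvInv (d : PySem.Dict String Int) (t : PvTrie) : Prop :=
  t.children.length = t.prefixes.length ∧
  t.counts.length = t.prefixes.length ∧
  t.prefixes.getD 0 "" = "" ∧
  t.prefixes.Nodup ∧
  d.items = (t.prefixes.drop 1).zip (t.counts.drop 1) ∧
  (∀ j c k, (t.children.getD j PySem.Dict.empty).get? c = some k ↔
      (j < t.prefixes.length ∧ k < t.prefixes.length ∧
        t.prefixes.getD k "" = t.prefixes.getD j "" ++ c.toString)) ∧
  (∀ k, 0 < k → k < t.prefixes.length →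
      ∃ j c, (t.children.getD j PySem.Dict.empty).get? c = some k)

-- a pointwise dict overwrite on an assoc list with distinct keys is a set at the key's index
lemma pvZipMap_id (ps : List String) (cs : List Int) (key : String) (w : Int) (hk : key ∉ ps) :
    (ps.zip cs).map (fun q => if q.1 == key then (key, w) else q) = ps.zip cs := by
  induction ps generalizing cs with
  | nil => simp
  | cons p pt ih =>
      cases cs with
      | nil => simp
      | cons v ct =>
          have hpk : p ≠ key := by intro h; exact hk (by simp [h])
          simp only [List.zip_cons_cons, List.map_cons]
          rw [if_neg (by simpa using hpk), ih ct (fun h => hk (List.mem_cons_of_mem _ h))]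

lemma pvZipMap (ps : List String) (cs : List Int) (i : Nat) (key : String) (w : Int)
    (hnd : ps.Nodup) (hi : i < ps.length) (hkey : ps.getD i "" = key) :
    (ps.zip cs).map (fun q => if q.1 == key then (key, w) else q) = ps.zip (cs.set i w) := by
  induction ps generalizing cs i with
  | nil => simp at hi
  | cons p pt ih =>
      cases cs with
      | nil => simp
      | cons v ct =>
          simp only [List.nodup_cons] at hnd
          cases i with
          | zero =>
              have hp : p = key := by simpa using hkey
              subst hp
              simp only [List.zip_cons_cons, List.map_cons, List.set_cons_zero]
              rw [if_pos (by simp), pvZipMap_id pt ct p w hnd.1]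
          | succ n =>
              have hn' : n < pt.length := by simpa using hi
              have hp : p ≠ key := by
                intro h
                subst h
                refine hnd.1 ?_
                rw [← hkey, List.getD_cons_succ, List.getD_eq_getElem _ _ hn']
                exact List.getElem_mem _
              simp only [List.zip_cons_cons, List.map_cons, List.set_cons_succ]
              rw [if_neg (by simpa using hp), ih ct n hnd.2 hn' (by simpa using hkey)]

lemma pvStep_sim (d : PySem.Dict String Int) (t : PvTrie) (node : Nat) (c : Char)
    (hInv : pvInv d t) (hnode : node < t.prefixes.length) :
    pvInv (pvAStep d (t.prefixes.getD node "" ++ c.toString)) (pvTrieStep (t, node) c).1 ∧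
    (pvTrieStep (t, node) c).2 < (pvTrieStep (t, node) c).1.prefixes.length ∧
    (pvTrieStep (t, node) c).1.prefixes.getD (pvTrieStep (t, node) c).2 "" =
      t.prefixes.getD node "" ++ c.toString := by
  obtain ⟨ch, cs, ps⟩ := t
  obtain ⟨hc, hn, h0, hnd, hitems, hedge, hparent⟩ := hInv
  simp only at hc hn h0 hnd hitems hedge hparent hnode ⊢
  have hinj : ∀ i j, i < ps.length → j < ps.length → ps.getD i "" = ps.getD j "" → i = j := by
    intro i j hi hj he
    rw [List.getD_eq_getElem _ _ hi, List.getD_eq_getElem _ _ hj] at he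
    exact (List.Nodup.getElem_inj_iff hnd).mp he
  have hkeys : d.keys = ps.drop 1 := by
    show d.items.map Prod.fst = _
    rw [hitems]
    exact List.map_fst_zip (by simp; omega)
  rcases hl : (ch.getD node PySem.Dict.empty).get? c with _ | k
  · -- missing child: A inserts a fresh key, B creates a fresh node
    have hkey_notin : ∀ m, m < ps.length → ps.getD m "" ≠ ps.getD node "" ++ c.toString := by
      intro m hm he
      have := (hedge node c m).mpr ⟨hnode, hm, he⟩
      rw [hl] at this
      simp at this
    have hnotmem : (ps.getD node "" ++ c.toString) ∉ ps := by
      intro h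
      obtain ⟨m, hm, he⟩ := List.getElem_of_mem h
      exact hkey_notin m hm (by rw [List.getD_eq_getElem _ _ hm]; exact he)
    have hnotkeys : (ps.getD node "" ++ c.toString) ∉ d.keys := by
      rw [hkeys]
      intro h
      exact hnotmem ((List.drop_sublist 1 ps).subset h)
    have hcont : d.contains (ps.getD node "" ++ c.toString) = false := by
      rw [PySem.Dict.contains_eq_decide_mem_keys]
      exact decide_eq_false hnotkeys
    have hconv : pvAStep d (ps.getD node "" ++ c.toString)
        = d.insert (ps.getD node "" ++ c.toString) 1 := by
      rw [pvAStep, if_pos hnotkeys]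
    have hcounts' : (cs ++ [0]).set ch.length ((cs ++ [0]).getD ch.length 0 + 1)
        = cs ++ [1] := by
      rw [hc, ← hn]
      simp [List.getD]
    have f1 : ∀ m, m < ps.length →
        (ps ++ [ps.getD node "" ++ c.toString]).getD m "" = ps.getD m "" := by
      intro m hm
      exact List.getD_append ps _ "" m hm
    have f2 : (ps ++ [ps.getD node "" ++ c.toString]).getD ps.length ""
        = ps.getD node "" ++ c.toString := by
      simp [List.getD]
    have g2 : (ch.set node ((ch.getD node PySem.Dict.empty).insert c ch.length)
        ++ [PySem.Dict.empty]).getD node PySem.Dict.empty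
        = (ch.getD node PySem.Dict.empty).insert c ch.length := by
      rw [List.getD_append _ _ _ _ (by simp; omega),
        List.getD_eq_getElem _ _ (by simp; omega), List.getElem_set, if_pos rfl]
    have g1 : ∀ j, j < ps.length → j ≠ node →
        (ch.set node ((ch.getD node PySem.Dict.empty).insert c ch.length)
          ++ [PySem.Dict.empty]).getD j PySem.Dict.empty = ch.getD j PySem.Dict.empty := by
      intro j hj hne
      rw [List.getD_append _ _ _ _ (by simp; omega),
        List.getD_eq_getElem _ _ (by simp; omega), List.getElem_set,
        if_neg (fun h => hne h.symm), ← List.getD_eq_getElem]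
    have g3 : ∀ j, ps.length ≤ j →
        (ch.set node ((ch.getD node PySem.Dict.empty).insert c ch.length)
          ++ [PySem.Dict.empty]).getD j PySem.Dict.empty = PySem.Dict.empty := by
      intro j hj
      rcases eq_or_lt_of_le hj with h | h
      · rw [List.getD_eq_getElem _ _ (by simp; omega)]
        rw [List.getElem_append_right (by simp; omega)]
        simp [hc, ← h]
      · rw [List.getD_eq_getElem?_getD, List.getElem?_eq_none (by simp; omega)]
        rfl
    simp only [pvTrieStep, hl]
    rw [hconv, hcounts']
    refine ⟨⟨by simp [hc], by simp [hn], ?_, ?_, ?_, ?_, ?_⟩, by simp; omega, by rw [hc]; exact f2⟩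
    · rw [f1 0 (by omega)]
      exact h0
    · simp only [List.nodup_append]
      exact ⟨hnd, by simp, fun a ha b hb => by
        simp only [List.mem_singleton] at hb
        subst hb
        exact fun h => hnotmem (h ▸ ha)⟩
    · rw [PySem.Dict.items_insert_of_not_contains _ _ hcont, hitems,
        List.drop_append_of_le_length (by omega), List.drop_append_of_le_length (by omega),
        List.zip_append (by simp; omega)]
      rfl
    · -- edge characterisation for the extended trie
      intro j c' k'
      rcases Nat.lt_or_ge j ps.length with hj | hj
      · rcases eq_or_ne j node with hjn | hjn
        · subst hjn
          rw [g2]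
          rcases eq_or_ne c' c with hcc | hcc
          · subst hcc
            rw [PySem.Dict.get?_insert_self]
            constructor
            · intro h
              have hk' : k' = ps.length := by rw [← hc]; exact (Option.some_injective _ h).symm
              subst hk'
              refine ⟨by simp; omega, by simp, ?_⟩
              rw [f2, f1 j hj]
            · rintro ⟨-, hk', he⟩
              simp only [List.length_append, List.length_cons, List.length_nil] at hk'
              rcases Nat.lt_or_ge k' ps.length with h | h
              · rw [f1 k' h, f1 j hj] at he
                exact absurd he (hkey_notin k' h)
              · have : k' = ps.length := by omega
                subst this
                rw [hc]
          · rw [PySem.Dict.get?_insert_of_ne _ _ hcc]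
            constructor
            · intro h
              obtain ⟨h1, h2, h3⟩ := (hedge j c' k').mp h
              exact ⟨by simp; omega, by simp; omega, by rw [f1 k' h2, f1 j hj]; exact h3⟩
            · rintro ⟨-, hk', he⟩
              simp only [List.length_append, List.length_cons, List.length_nil] at hk'
              rcases Nat.lt_or_ge k' ps.length with h | h
              · rw [f1 k' h, f1 j hj] at he
                exact (hedge j c' k').mpr ⟨hj, h, he⟩
              · have : k' = ps.length := by omega
                subst this
                rw [f2, f1 j hj] at he
                exact absurd (pvAppend_inj he.symm).2 hcc
        · rw [g1 j hj hjn]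
          constructor
          · intro h
            obtain ⟨h1, h2, h3⟩ := (hedge j c' k').mp h
            exact ⟨by simp; omega, by simp; omega, by rw [f1 k' h2, f1 j hj]; exact h3⟩
          · rintro ⟨-, hk', he⟩
            simp only [List.length_append, List.length_cons, List.length_nil] at hk'
            rcases Nat.lt_or_ge k' ps.length with h | h
            · rw [f1 k' h, f1 j hj] at he
              exact (hedge j c' k').mpr ⟨hj, h, he⟩
            · have : k' = ps.length := by omega
              subst this
              rw [f2, f1 j hj] at he
              obtain ⟨he1, he2⟩ := pvAppend_inj he.symm
              exact absurd (hinj j node hj hnode he1) hjn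
      · rw [g3 j hj]
        constructor
        · intro h
          rw [PySem.Dict.get?_empty] at h
          simp at h
        · rintro ⟨hjb, hk', he⟩
          simp only [List.length_append, List.length_cons, List.length_nil] at hjb hk'
          have hje : j = ps.length := by omega
          subst hje
          rw [f2] at he
          rcases Nat.lt_or_ge k' ps.length with h | h
          · rw [f1 k' h] at he
            rcases Nat.eq_zero_or_pos k' with h0' | h0'
            · subst h0'
              rw [h0] at he
              exact absurd he.symm (pvAppend_ne_empty _ _)
            · obtain ⟨j0, c0, e0⟩ := hparent k' h0' h
              obtain ⟨hj0, -, he0⟩ := (hedge j0 c0 k').mp e0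
              rw [he] at he0
              exact absurd (pvAppend_inj he0).1.symm (hkey_notin j0 hj0)
          · have : k' = ps.length := by omega
            subst this
            rw [f2] at he
            have := congrArg String.toList he
            simp at this
    · -- every non-root node still has a parent edge
      intro k' hk0 hk'
      simp only [List.length_append, List.length_cons, List.length_nil] at hk'
      rcases Nat.lt_or_ge k' ps.length with h | h
      · obtain ⟨j0, c0, e0⟩ := hparent k' hk0 h
        obtain ⟨hj0, -, -⟩ := (hedge j0 c0 k').mp e0
        rcases eq_or_ne j0 node with hjn | hjn
        · have hc0 : c0 ≠ c := by
            intro hcc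
            rw [hjn, hcc, hl] at e0
            simp at e0
          exact ⟨node, c0, by rw [g2, PySem.Dict.get?_insert_of_ne _ _ hc0, ← hjn]; exact e0⟩
        · exact ⟨j0, c0, by rw [g1 j0 hj0 hjn]; exact e0⟩
      · have : k' = ps.length := by omega
        subst this
        exact ⟨node, c, by rw [g2, PySem.Dict.get?_insert_self, hc]⟩
  · -- existing child k: A bumps the key's count, B bumps node k's count
    obtain ⟨-, hkl, hkey⟩ := (hedge node c k).mp hl
    have hk1 : 1 ≤ k := by
      rcases Nat.eq_zero_or_pos k with h | h
      · subst h; rw [h0] at hkey; exact absurd hkey.symm (pvAppend_ne_empty _ _)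
      · exact h
    have hkcs : k < cs.length := by omega
    have hkp : k - 1 < (ps.drop 1).length := by simp; omega
    have hkc : k - 1 < (cs.drop 1).length := by simp; omega
    have hdk : ps.getD k "" = (ps.drop 1)[k-1]'hkp := by
      rw [List.getD_eq_getElem _ _ hkl, List.getElem_drop]
      congr 1
      omega
    have hck : cs.getD k 0 = (cs.drop 1)[k-1]'hkc := by
      rw [List.getD_eq_getElem _ _ hkcs, List.getElem_drop]
      congr 1
      omega
    have hmem : (ps.getD node "" ++ c.toString) ∈ d.keys := by
      rw [hkeys, ← hkey, hdk]
      exact List.getElem_mem _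
    have hconv : pvAStep d (ps.getD node "" ++ c.toString)
        = d.insert (ps.getD node "" ++ c.toString)
            (d.getD (ps.getD node "" ++ c.toString) 0 + 1) := by
      rw [pvAStep, if_neg (by simpa using hmem)]
      rfl
    have hndk : d.keys.Nodup := by rw [hkeys]; exact hnd.sublist (List.drop_sublist 1 _)
    have hklz : k - 1 < ((ps.drop 1).zip (cs.drop 1)).length := by simp; omega
    have hitem : (ps.getD node "" ++ c.toString, (cs.drop 1)[k-1]'hkc) ∈ d.items := by
      rw [hitems, ← hkey, hdk]
      have h := List.getElem_mem hklz
      rwa [List.getElem_zip] at h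
    have hval : d.getD (ps.getD node "" ++ c.toString) 0 = (cs.drop 1)[k-1]'hkc :=
      PySem.Dict.getD_of_mem_items _ hitem hndk 0
    have hcont : d.contains (ps.getD node "" ++ c.toString) = true := by
      rw [PySem.Dict.contains_iff_mem_keys]
      exact hmem
    simp only [pvTrieStep, hl]
    refine ⟨⟨hc, by simpa using hn, h0, hnd, ?_, hedge, hparent⟩, by simpa using hkl, hkey⟩
    rw [hconv, PySem.Dict.items_insert_of_contains _ _ hcont, hitems,
      pvZipMap _ _ (k-1) _ _ (hnd.sublist (List.drop_sublist 1 _)) hkp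
        (by rw [List.getD_eq_getElem _ _ hkp, ← hdk]; exact hkey),
      hval, hck, List.drop_set]
    simp [Nat.not_lt.mpr hk1]

lemma pvChars_sim (l : List Char) (d : PySem.Dict String Int) (t : PvTrie) (node : Nat)
    (acc : String) (hInv : pvInv d t) (hnode : node < t.prefixes.length)
    (hacc : t.prefixes.getD node "" = acc) :
    pvInv (l.foldl (fun p c => (pvAStep p.1 (p.2 ++ c.toString), p.2 ++ c.toString)) (d, acc)).1
        (l.foldl pvTrieStep (t, node)).1 ∧
    (l.foldl pvTrieStep (t, node)).2 < (l.foldl pvTrieStep (t, node)).1.prefixes.length ∧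
    (l.foldl pvTrieStep (t, node)).1.prefixes.getD (l.foldl pvTrieStep (t, node)).2 "" =
      (l.foldl (fun p c => (pvAStep p.1 (p.2 ++ c.toString), p.2 ++ c.toString)) (d, acc)).2 := by
  induction l generalizing d t node acc with
  | nil => exact ⟨hInv, hnode, hacc⟩
  | cons c rest ih =>
      obtain ⟨h1, h2, h3⟩ := pvStep_sim d t node c hInv hnode
      rw [hacc] at h1 h3
      exact ih _ _ _ _ h1 h2 h3

-- the index loop over take-prefixes is the fold over characters with an accumulated prefix
lemma pvRangeFold (l : List Char) (pref : String) (d : PySem.Dict String Int) :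
    (List.range l.length).foldl (fun d k => pvAStep d (pref ++ String.ofList (l.take (k+1)))) d
    = (l.foldl (fun p c => (pvAStep p.1 (p.2 ++ c.toString), p.2 ++ c.toString)) (d, pref)).1 := by
  induction l generalizing pref d with
  | nil => rfl
  | cons c t ih =>
      rw [List.length_cons, List.range_succ_eq_map, List.foldl_cons, List.foldl_map]
      have h1 : pref ++ String.ofList ((c :: t).take (0+1)) = pref ++ c.toString := by
        simp [pvOfList_cons]
      rw [h1]
      have h2 : (fun d k => pvAStep d (pref ++ String.ofList ((c :: t).take (k + 1 + 1))))
          = fun d k => pvAStep d ((pref ++ c.toString) ++ String.ofList (t.take (k+1))) := by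
        funext d k
        rw [List.take_succ_cons, pvOfList_cons, ← String.append_assoc]
      rw [h2, ih]
      rfl

-- A's inner loop over slice indices is the fold over characters with an accumulated prefix
lemma pvA_inner_eq (s : String) (d : PySem.Dict String Int) :
    (PySem.List.pyRange 1 (PySem.Str.len s + 1) 1).foldl
      (fun d index => pvAStep d (PySem.Str.slice s none (some index))) d
    = (s.toList.foldl (fun p c => (pvAStep p.1 (p.2 ++ c.toString), p.2 ++ c.toString)) (d, "")).1 := by
  have hlen : PySem.Str.len s = (s.toList.length : Int) := by simp [pysem]
  rw [hlen, PySem.List.pyRange_one, List.foldl_map]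
  have hn : ((s.toList.length : Int) + 1 - 1).toNat = s.toList.length := by omega
  rw [hn]
  have h : (fun d (k : Nat) => pvAStep d (PySem.Str.slice s none (some (1 + (k:Int)))))
      = fun d k => pvAStep d ("" ++ String.ofList (s.toList.take (k+1))) := by
    funext d k
    rw [pvSlice_key, String.empty_append]
  rw [h, pvRangeFold]

-- invariant holds at the start
lemma pvInv_init : pvInv PySem.Dict.empty ⟨[PySem.Dict.empty], [0], [""]⟩ := by
  refine ⟨rfl, rfl, rfl, by simp, rfl, ?_, ?_⟩
  · intro j c k
    constructor
    · intro h
      have : (PySem.Dict.empty : PySem.Dict Char Nat).get? c = none := rfl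
      rcases j with _ | j <;> simp_all [List.getD]
    · rintro ⟨_, hk, heq⟩
      have hk0 : k = 0 := by simpa using hk
      subst hk0
      simp [List.getD] at heq
  · intro k h1 h2
    simp at h2
    omega

-- invariant after the whole book
lemma pvBook_sim (book : List String) (d : PySem.Dict String Int) (t : PvTrie)
    (hInv : pvInv d t) (hlen : 0 < t.prefixes.length) :
    pvInv (book.foldl
        (fun d s => (PySem.List.pyRange 1 (PySem.Str.len s + 1) 1).foldl
          (fun d index => pvAStep d (PySem.Str.slice s none (some index))) d) d)
      (book.foldl (fun t number => (number.toList.foldl pvTrieStep (t, 0)).1) t) := by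
  induction book generalizing d t with
  | nil => exact hInv
  | cons s rest ih =>
      rw [List.foldl_cons, List.foldl_cons, pvA_inner_eq]
      obtain ⟨h1, h2, _⟩ := pvChars_sim s.toList d t 0 "" hInv hlen hInv.2.2.1
      exact ih _ _ h1 (by omega)

-- the output comprehension's key list is the prefixes after the root
lemma pvMap_pyRange (ps : List String) :
    (PySem.List.pyRange 1 (ps.length:Int) 1).map (fun i => PySem.List.pyGetD ps i "")
      = ps.drop 1 := by
  rw [PySem.List.pyRange_one, List.map_map]
  apply List.ext_getElem
  · simp
  · intro m h1 h2
    simp only [List.length_map, List.length_range] at h1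
    simp only [List.getElem_map, List.getElem_range, Function.comp_apply, List.getElem_drop]
    have hm : (1 + (m:Int)) = ((1+m : Nat) : Int) := by push_cast; ring
    rw [hm, PySem.List.pyGetD_natCast, List.getD_eq_getElem ps "" (by omega)]

-- the output comprehension's item list is the zipped prefixes/counts after the root
lemma pvMap_pyRange_pair (ps : List String) (cs : List Int) (hlen : cs.length = ps.length) :
    (PySem.List.pyRange 1 (cs.length:Int) 1).map
        (fun i => (PySem.List.pyGetD ps i "", PySem.List.pyGetD cs i 0))
      = (ps.drop 1).zip (cs.drop 1) := by
  rw [PySem.List.pyRange_one, List.map_map]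
  apply List.ext_getElem
  · simp; omega
  · intro m h1 h2
    simp only [List.length_map, List.length_range] at h1
    simp only [List.getElem_map, List.getElem_range, Function.comp_apply, List.getElem_zip,
      List.getElem_drop]
    have hm : (1 + (m:Int)) = ((1+m : Nat) : Int) := by push_cast; ring
    rw [hm, PySem.List.pyGetD_natCast, PySem.List.pyGetD_natCast,
      List.getD_eq_getElem ps "" (by omega), List.getD_eq_getElem cs 0 (by omega)]

-- extraction: from the invariant, A's dict items equal B's output dict items
lemma pvExtract (d : PySem.Dict String Int) (t : PvTrie) (hInv : pvInv d t) :
    d.items = ((PySem.List.pyRange 1 (PySem.List.len t.counts) 1).foldl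
      (fun d i => d.insert (PySem.List.pyGetD t.prefixes i "") (PySem.List.pyGetD t.counts i 0))
      PySem.Dict.empty).items := by
  obtain ⟨hc, hn, h0, hnd, hitems, _, _⟩ := hInv
  have hfresh : ∀ a ∈ PySem.List.pyRange 1 (PySem.List.len t.counts) 1,
      (PySem.Dict.empty : PySem.Dict String Int).contains (PySem.List.pyGetD t.prefixes a "") = false := by
    intro a _; simp [pysem]
  have hlen' : PySem.List.len t.counts = (t.counts.length : Int) := by simp [pysem]
  have hnd' : ((PySem.List.pyRange 1 (PySem.List.len t.counts) 1).map
      (fun i => PySem.List.pyGetD t.prefixes i "")).Nodup := by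
    rw [hlen', hn, pvMap_pyRange]
    exact hnd.sublist (List.drop_sublist 1 _)
  rw [PySem.Dict.items_foldl_insert_fresh _ _ _ _ hfresh hnd']
  rw [hlen', pvMap_pyRange_pair _ _ hn, hitems]
  rfl

-- ===== VERDICT (by name: the statement is the Claim_ definition above) =====
theorem make_phone_book_hash_spec : Claim_equal_make_phone_book_hash := by
  intro book _
  show _ = _
  unfold make_phone_book_hash make_phone_book_hash_alt
  have h := pvBook_sim book PySem.Dict.empty ⟨[PySem.Dict.empty], [0], [""]⟩ pvInv_init (by simp)
  exact pvExtract _ _ h
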